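-- pv_equiv track=rewrite | github.com/joonaspessi/advent_of_code_2020 | day6/app.py | get_group_declarations
-- ===== SOURCE A (Python) =====
-- def get_group_declarations(input_lines):
--     group = []
--     declarations = []
--     for line in input_lines:
--         line = line.rstrip()
--         if line == "":
--             flat_group = [item for sub_list in group for item in sub_list]
--             distinct_group = set(flat_group)
--             declarations.append(distinct_group)
--             group = []
--             continue
--         group.append([char for char in line])
--
--     flat_group = [item for sub_list in group for item in sub_list]
--     distinct_group = set(flat_group)
--     declarations.append(distinct_group)
--
--     return declarations
-- ===== SOURCE B (Python) =====
-- def get_group_declarations(input_lines):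
--     # Delimiter-splitting recursion: rstrip everything first, then recursively cut the
--     # line list at the first blank line; finally join each group and take its char set.
--     lines = [line.rstrip() for line in input_lines]
--
--     def split_groups(ls):
--         if "" in ls:
--             i = ls.index("")
--             return [ls[:i]] + split_groups(ls[i + 1:])
--         return [ls]
--
--     return [set("".join(g)) for g in split_groups(lines)]
-- ===== Notes on version B (the rewrite author's own statement) =====
-- stated objective: alternative
-- what changed: Instead of A's single stateful loop that accumulates a growing group and flushes it at each blank line (plus a duplicated trailing flush), B rstrips all lines up front and then recursively splits the line list at the first blank line using index/slicing, finally turning each group into set("".join(group)) in one comprehension.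
import Mathlib
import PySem

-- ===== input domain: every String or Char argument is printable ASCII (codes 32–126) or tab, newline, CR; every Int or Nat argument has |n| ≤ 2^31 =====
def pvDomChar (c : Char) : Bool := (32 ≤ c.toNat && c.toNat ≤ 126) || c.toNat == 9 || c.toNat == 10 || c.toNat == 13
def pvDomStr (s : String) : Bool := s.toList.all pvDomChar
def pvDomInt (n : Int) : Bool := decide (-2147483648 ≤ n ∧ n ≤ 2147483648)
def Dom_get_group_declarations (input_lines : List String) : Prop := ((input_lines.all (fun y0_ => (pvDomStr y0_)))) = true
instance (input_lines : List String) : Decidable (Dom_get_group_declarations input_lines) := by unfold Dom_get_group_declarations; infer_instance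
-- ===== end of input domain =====

-- B replaces A's stateful accumulator loop by a delimiter-splitting recursion (rstrip every
-- line first, recursively cut the list at the first blank line, then set each joined group);
-- equal return values are proved for all inputs.

-- [char for char in line] / set(<str>): a Python string iterates as 1-character strings
def pvLineChars (line : String) : List String := line.toList.map (fun c => String.ofList [c])

-- ===== PORT A =====
def get_group_declarations (input_lines : List String) : List (List String) :=
  let st := input_lines.foldl
    (fun (st : List (List String) × List (List String)) line =>
      let line := PySem.Str.rstrip line
      if line == "" then
        (([] : List (List String)),
         st.2 ++ [PySem.Set.ofList (st.1.flatMap (fun sub => sub))])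
      else
        (st.1 ++ [pvLineChars line], st.2))
    (([] : List (List String)), ([] : List (List String)))
  st.2 ++ [PySem.Set.ofList (st.1.flatMap (fun sub => sub))]

-- ===== PORT B =====
-- split_groups: 'if "" in ls: i = ls.index(""); return [ls[:i]] + split_groups(ls[i+1:]); return [ls]'
-- ('"" in ls' together with 'ls.index("")' is exactly the some/none split of index?)
def pvSplitGroups (ls : List String) : List (List String) :=
  match hi : PySem.List.index? ls "" with
  | some i =>
      [PySem.List.slice ls (some 0) (some (i : Int))] ++
        pvSplitGroups (PySem.List.slice ls (some ((i : Int) + 1)) none)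
  | none => [ls]
termination_by ls.length
decreasing_by
  obtain ⟨hk, -, -⟩ := PySem.List.getElem_of_index?_eq_some hi
  rw [PySem.List.slice_from]
  · simp; omega
  · omega

-- set("".join(g))
def pvGroupSet (g : List String) : List String :=
  PySem.Set.ofList ((PySem.Str.join "" g).toList.map (fun c => String.ofList [c]))

def get_group_declarations_alt (input_lines : List String) : List (List String) :=
  let lines := input_lines.map (fun line => PySem.Str.rstrip line)
  (pvSplitGroups lines).map (fun g => pvGroupSet g)

-- ===== PRECONDITION & SPEC =====
def Spec_get_group_declarations (input_lines : List String) (out : List (List String)) : Prop := out = get_group_declarations_alt input_lines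
instance (input_lines : List String) (out : List (List String)) : Decidable (Spec_get_group_declarations input_lines out) := by unfold Spec_get_group_declarations; infer_instance

-- ===== CLAIM (what is proved, stated in full; the proofs are below) =====
def Claim_equal_get_group_declarations : Prop := ∀ (input_lines : List String), Dom_get_group_declarations input_lines → Spec_get_group_declarations input_lines (get_group_declarations input_lines)

-- ===== LEMMAS AND PROOFS =====

theorem pvSplitGroups_nil : pvSplitGroups [] = [[]] := by
  rw [pvSplitGroups]; simp

theorem pvSplitGroups_cons_blank (rest : List String) :
    pvSplitGroups ("" :: rest) = [[]] ++ pvSplitGroups rest := by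
  rw [pvSplitGroups]
  rw [PySem.List.index?_cons_self]
  simp [PySem.List.slice_from_one]
  rw [PySem.List.slice]
  simp

theorem pvSplitGroups_cons_ne (l : String) (rest : List String) (hl : l ≠ "") :
    pvSplitGroups (l :: rest) =
      (l :: (pvSplitGroups rest).headI) :: (pvSplitGroups rest).tail := by
  rw [pvSplitGroups, pvSplitGroups]
  rw [PySem.List.index?_cons_of_ne _ hl]
  cases h : PySem.List.index? rest "" with
  | none => simp
  | some i =>
    simp only [Option.map_some]
    have h1 : ((i : Int) + 1) = (((i + 1 : Nat) : Int)) := by push_cast; ring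
    have h2 : (((i + 1 : Nat) : Int) + 1) = (((i + 2 : Nat) : Int)) := by push_cast; ring
    rw [h1]
    rw [PySem.List.slice_zero_start, PySem.List.slice_zero_start,
      PySem.List.slice_to_natCast, PySem.List.slice_to_natCast]
    rw [h2, PySem.List.slice_from_natCast, PySem.List.slice_from_natCast]
    simp [List.take_succ_cons, List.drop_succ_cons]

theorem pvSplitGroups_ne_nil (ls : List String) : pvSplitGroups ls ≠ [] := by
  rw [pvSplitGroups]
  cases h : PySem.List.index? ls "" <;> simp

-- characters of "".join(g) are the concatenation of the lines' characters
theorem pv_chars_join (g : List (List Char)) :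
    PySem.Chars.join [] g = g.flatten := by
  induction g with
  | nil => simp [PySem.Chars.join_nil]
  | cons x r ih =>
    cases r with
    | nil => simp [PySem.Chars.join_singleton]
    | cons y t => rw [PySem.Chars.join_cons_cons]; simp_all

theorem pv_join_chars (g : List String) :
    (PySem.Str.join "" g).toList = (g.map String.toList).flatten := by
  rw [PySem.Str.toList_join]
  simp [pv_chars_join]

-- prepend an already-accumulated group of lines onto B's first group
def pvConsPre (pre : List String) : List (List String) → List (List String)
  | [] => [pre]
  | g :: gs => (pre ++ g) :: gs

theorem pvConsPre_nil_pre {gs : List (List String)} (h : gs ≠ []) : pvConsPre [] gs = gs := by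
  cases gs with
  | nil => exact absurd rfl h
  | cons g t => simp [pvConsPre]

theorem pvConsPre_cons (pre : List String) (l : String) {gs : List (List String)} (h : gs ≠ []) :
    pvConsPre pre ((l :: gs.headI) :: gs.tail) = pvConsPre (pre ++ [l]) gs := by
  cases gs with
  | nil => exact absurd rfl h
  | cons g t => simp [pvConsPre]

-- flushing A's accumulated group gives exactly B's set of the joined group
theorem pv_flush (pre : List String) :
    PySem.Set.ofList ((pre.map pvLineChars).flatten) = pvGroupSet pre := by
  rw [pvGroupSet, pv_join_chars]
  congr 1
  induction pre with
  | nil => simp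
  | cons x r ih => simp [pvLineChars, ih]

-- Loop invariant: A's fold from state (pre.map pvLineChars, decls), flushed at the end,
-- equals decls ++ B's groups of the remaining stripped lines with pre prefixed onto the first.
theorem pv_loop (lines : List String) (decls : List (List String)) (pre : List String) :
    ((lines.foldl
        (fun (st : List (List String) × List (List String)) line =>
          let line := PySem.Str.rstrip line
          if line == "" then
            (([] : List (List String)),
             st.2 ++ [PySem.Set.ofList (st.1.flatMap (fun sub => sub))])
          else
            (st.1 ++ [pvLineChars line], st.2))
        (pre.map pvLineChars, decls)).2 ++
      [PySem.Set.ofList (((lines.foldl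
        (fun (st : List (List String) × List (List String)) line =>
          let line := PySem.Str.rstrip line
          if line == "" then
            (([] : List (List String)),
             st.2 ++ [PySem.Set.ofList (st.1.flatMap (fun sub => sub))])
          else
            (st.1 ++ [pvLineChars line], st.2))
        (pre.map pvLineChars, decls)).1).flatMap (fun sub => sub))]) =
    decls ++ (pvConsPre pre (pvSplitGroups (lines.map (fun line => PySem.Str.rstrip line)))).map pvGroupSet := by
  induction lines generalizing decls pre with
  | nil =>
    simp [pvSplitGroups_nil, pvConsPre, pv_flush]
  | cons line rest ih =>
    simp only [List.foldl_cons, List.map_cons]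
    by_cases h : PySem.Str.rstrip line == ""
    · have hb : PySem.Str.rstrip line = "" := by simpa using h
      simp only [h, if_pos]
      have := ih (decls ++ [PySem.Set.ofList ((pre.map pvLineChars).flatMap (fun sub => sub))]) []
      rw [hb, pvSplitGroups_cons_blank]
      rw [pvConsPre_nil_pre (pvSplitGroups_ne_nil _)] at this
      simpa [pvConsPre, pv_flush] using this
    · have hb : PySem.Str.rstrip line ≠ "" := by simpa using h
      simp only [h, if_neg, Bool.false_eq_true, not_false_iff]
      have := ih decls (pre ++ [PySem.Str.rstrip line])
      rw [pvSplitGroups_cons_ne _ _ hb, pvConsPre_cons _ _ (pvSplitGroups_ne_nil _)]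
      simpa using this

-- ===== VERDICT (by name: the statement is the Claim_ definition above) =====
theorem get_group_declarations_spec : Claim_equal_get_group_declarations := by
  intro input_lines _
  unfold Spec_get_group_declarations get_group_declarations get_group_declarations_alt
  have h := pv_loop input_lines [] []
  rw [pvConsPre_nil_pre (pvSplitGroups_ne_nil _)] at h
  simpa using h
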